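-- pv_equiv track=rewrite | github.com/flsworld/leetcode | python/gitguardian/ex2.py | solution
-- ===== SOURCE A (Python) =====
-- def is_adjacent(p: int, q: int):
--     return q - p <= 1
--
-- def solution(A: list):
--     hashmap = {}
--     for x, y in zip(range(1, len(A) - 1), A[1:-1]):
--         hashmap[x] = y
--
--     sorted_cost = sorted(hashmap.items(), key=lambda x: x[1])
--     min_cost = sorted_cost[-1][1] + sorted_cost[-2][1]
--     started = False
--     for x in range(len(hashmap)):
--         pivot, pivot_cost = sorted_cost[x]
--         for position, position_cost in sorted_cost:
--             if is_adjacent(pivot, position):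
--                 continue
--             cost = position_cost + pivot_cost
--             if started and cost > min_cost:
--                 break
--             if cost < min_cost:
--                 min_cost = cost
--             break
--         started = True
--
--     return min_cost
-- ===== SOURCE B (Python) =====
-- def solution(A):
--     vals = A[1:-1]
--     suff = []
--     m = vals[-1]
--     for v in reversed(vals):
--         m = m if m < v else v
--         suff.append(m)
--     suff.reverse()
--     s = sorted(vals)
--     best = s[-1] + s[-2]
--     for v, m in zip(vals, suff[2:]):
--         if v + m < best:
--             best = v + m
--     return best
-- ===== Notes on version B (the rewrite author's own statement) =====
-- stated objective: faster
-- what changed: Replaces A's dict build + sort of (index,value) pairs + per-pivot scan over the sorted list (worst-case O(n^2)) by a single suffix-minimum sweep: seed with the sum of the two largest interior values, then one zip pass adding each interior value to the minimum value at least two indices to its right.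
import Mathlib
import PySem

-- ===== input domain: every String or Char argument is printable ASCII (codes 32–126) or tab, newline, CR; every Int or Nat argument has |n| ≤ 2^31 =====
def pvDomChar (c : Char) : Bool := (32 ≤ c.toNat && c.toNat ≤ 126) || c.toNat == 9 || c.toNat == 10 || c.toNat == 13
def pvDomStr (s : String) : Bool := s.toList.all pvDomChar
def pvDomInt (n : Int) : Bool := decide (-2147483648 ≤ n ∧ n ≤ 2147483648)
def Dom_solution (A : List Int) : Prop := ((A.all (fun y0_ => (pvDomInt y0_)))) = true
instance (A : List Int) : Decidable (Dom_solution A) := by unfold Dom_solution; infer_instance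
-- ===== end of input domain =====

-- B replaces A's sort-of-pairs + per-pivot scan (worst-case quadratic) by a suffix-minimum
-- sweep: seed with the sum of the two largest interior values, then one pass adding each
-- interior value to the minimum value at least two positions to its right.

-- ===== PORT A =====
def isAdjacent (p q : Int) : Bool := q - p ≤ 1

-- the inner 'for position, position_cost in sorted_cost' loop with its continue/break structure
def solInner (s : List (Int × Int)) (pivot pivotCost minCost : Int) (started : Bool) : Int :=
  match s with
  | [] => minCost
  | z :: rest =>
    if isAdjacent pivot z.1 then solInner rest pivot pivotCost minCost started
    else
      let cost := z.2 + pivotCost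
      if started ∧ cost > minCost then minCost
      else if cost < minCost then cost else minCost

def solution (A : List Int) : Int :=
  let hashmap := ((PySem.List.pyRange 1 ((A.length : Int) - 1) 1).zip
      (PySem.List.slice A (some 1) (some (-1)))).foldl
      (fun d p => d.insert p.1 p.2) PySem.Dict.empty
  let sortedCost := PySem.List.sorted hashmap.items (fun z => z.2) false
  match PySem.List.pyGet? sortedCost (-1), PySem.List.pyGet? sortedCost (-2) with
  | some l1, some l2 =>
    let minCost := l1.2 + l2.2
    -- 'for x in range(len(hashmap)): pivot, pivot_cost = sorted_cost[x]' — x is always in range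
    ((PySem.List.pyRange 0 (hashmap.size : Int) 1).foldl
      (fun st x =>
        let pr := PySem.List.pyGetD sortedCost x (0, 0)
        (solInner sortedCost pr.1 pr.2 st.1 st.2, true))
      (minCost, false)).1
  | _, _ => 0  -- Python raises IndexError here (fewer than 2 interior elements); excluded by Pre_

-- ===== PORT B =====
def solution_alt (A : List Int) : Int :=
  let vals := PySem.List.slice A (some 1) (some (-1))
  match PySem.List.pyGet? vals (-1) with
  | none => 0  -- Python raises IndexError (vals empty); excluded by Pre_
  | some m0 =>
    -- suffix-minimum sweep over reversed(vals), then reverse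
    let st := vals.reverse.foldl
      (fun (st : List Int × Int) v =>
        let m := if st.2 < v then st.2 else v
        (st.1 ++ [m], m)) (([] : List Int), m0)
    let suff := st.1.reverse
    let s := PySem.List.sorted vals (fun x => x) false
    match PySem.List.pyGet? s (-1) with
    | none => 0  -- Python raises IndexError; excluded by Pre_
    | some a =>
      match PySem.List.pyGet? s (-2) with
      | none => 0  -- Python raises IndexError; excluded by Pre_
      | some b =>
        (vals.zip (PySem.List.slice suff (some 2) none)).foldl
          (fun best vm => if vm.1 + vm.2 < best then vm.1 + vm.2 else best) (a + b)

-- ===== PRECONDITION & SPEC =====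
-- Pre_ excludes exactly the inputs with fewer than two interior elements (len(A) < 4),
-- on which the Python A raises IndexError (sorted_cost[-2]); B raises IndexError there too.
def Pre_solution (A : List Int) : Prop := 4 ≤ A.length
instance (A : List Int) : Decidable (Pre_solution A) := by unfold Pre_solution; infer_instance
def pvWitness_solution : List Int := [3, -5, 7, 2, 9, 1]
def Spec_solution (A : List Int) (out : Int) : Prop := out = solution_alt A
instance (A : List Int) (out : Int) : Decidable (Spec_solution A out) := by unfold Spec_solution; infer_instance

-- ===== CLAIM (what is proved, stated in full; the proofs are below) =====
def Claim_equal_solution : Prop := ∀ (A : List Int), Dom_solution A → Pre_solution A → Spec_solution A (solution A)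

-- ===== LEMMAS AND PROOFS =====

-- the common normal form both ports are reduced to
def nf (vs : List Int) : Int :=
  (PySem.List.enumerate (vs.take (vs.length - 2)) 1).foldl
    (fun mc z => min mc (((vs.drop (z.1 + 1).toNat).min?).getD 0 + z.2))
    ((PySem.List.sorted vs (fun x => x) false).getD (vs.length - 1) 0
      + (PySem.List.sorted vs (fun x => x) false).getD (vs.length - 2) 0)

-- zip(range(a, a+len(vs)), vs) is enumerate(vs, a)
theorem zip_pyRange_eq_enumerate (vs : List Int) (a : Int) :
    (PySem.List.pyRange a (a + (vs.length : Int)) 1).zip vs = PySem.List.enumerate vs a := by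
  induction vs generalizing a with
  | nil => simp [PySem.List.pyRange_one_eq_nil, PySem.List.enumerate_nil]
  | cons v t ih =>
    rw [PySem.List.pyRange_one_cons (by simp only [List.length_cons]; push_cast; omega)]
    have : a + ((v :: t).length : Int) = (a + 1) + (t.length : Int) := by
      simp only [List.length_cons]; push_cast; omega
    rw [this, List.zip_cons_cons, PySem.List.enumerate_cons, ih]

-- the inner loop returns min(minCost, cost-of-first-non-adjacent), independently of `started`
theorem solInner_eq (l : List (Int × Int)) (pivot pc mc : Int) (st : Bool) :
    solInner l pivot pc mc st =
      match l.find? (fun z => !isAdjacent pivot z.1) with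
      | none => mc
      | some z => min mc (z.2 + pc) := by
  induction l with
  | nil => simp [solInner]
  | cons z rest ih =>
    simp only [solInner]
    by_cases h : isAdjacent pivot z.1 = true
    · rw [if_pos h, List.find?_cons_of_neg (by simp [h]), ih]
    · rw [if_neg h, List.find?_cons_of_pos (by simp [h])]
      show _ = min mc (z.2 + pc)
      rw [min_def]
      rcases st with _ | _ <;> split_ifs <;> simp_all <;> omega

-- the outer fold's first component ignores `started` and is a fold of the per-pivot min step
theorem outer_fold_eq (S : List (Int × Int)) (l : List (Int × Int)) (mc : Int) (st : Bool) :
    (l.foldl (fun st pr => (solInner S pr.1 pr.2 st.1 st.2, true)) (mc, st)).1 =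
      l.foldl (fun mc pr =>
        match S.find? (fun z => !isAdjacent pr.1 z.1) with
        | none => mc
        | some z => min mc (z.2 + pr.2)) mc := by
  induction l generalizing mc st with
  | nil => rfl
  | cons pr rest ih => rw [List.foldl_cons, List.foldl_cons, ih, solInner_eq]

-- predicate normalisation: "not adjacent" is "index ≥ pivot + 2"
theorem not_adjacent_eq (pivot : Int) :
    (fun z : Int × Int => !isAdjacent pivot z.1) = (fun z => decide (pivot + 2 ≤ z.1)) := by
  funext z
  simp only [isAdjacent, ← decide_not, decide_eq_decide]
  omega

-- in enumerate(vs, a), the values at index ≥ t form vs.drop (t-a)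
theorem map_snd_filter_enumerate (vs : List Int) (a t : Int) :
    ((PySem.List.enumerate vs a).filter (fun z => decide (t ≤ z.1))).map Prod.snd
      = vs.drop (t - a).toNat := by
  induction vs generalizing a with
  | nil => simp [PySem.List.enumerate_nil]
  | cons v xs ih =>
    rw [PySem.List.enumerate_cons]
    by_cases h : t ≤ a
    · have h0 : (t - a).toNat = 0 := by omega
      have h1 : (t - (a + 1)).toNat = 0 := by omega
      simp [h, ih, h0, h1]
    · have h2 : (t - a).toNat = (t - (a + 1)).toNat + 1 := by omega
      simp [h, ih, h2]

-- find? on a snd-sorted permutation of enumerate(vs,1) yields the min of the value-suffix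
theorem find_sorted_eq_min (vs : List Int) (S : List (Int × Int))
    (hperm : S.Perm (PySem.List.enumerate vs 1))
    (hpair : S.Pairwise (fun x y => x.2 ≤ y.2)) (pivot : Int) :
    (S.find? (fun z => decide (pivot + 2 ≤ z.1))).map Prod.snd
      = (vs.drop (pivot + 1).toNat).min? := by
  have hd : vs.drop (pivot + 1).toNat
      = ((PySem.List.enumerate vs 1).filter (fun z => decide (pivot + 2 ≤ z.1))).map Prod.snd := by
    rw [map_snd_filter_enumerate]
    congr 1
    omega
  rw [hd]
  cases hf : S.find? (fun z => decide (pivot + 2 ≤ z.1)) with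
  | none =>
    rw [List.find?_eq_none] at hf
    have : (PySem.List.enumerate vs 1).filter (fun z => decide (pivot + 2 ≤ z.1)) = [] := by
      rw [List.filter_eq_nil_iff]
      intro z hz
      exact hf z (hperm.mem_iff.mpr hz)
    simp [this]
  | some z =>
    symm
    rw [Option.map_some]
    rw [List.min?_eq_some_iff]
    have hzmem : z ∈ S := List.mem_of_find?_eq_some (p := fun w : Int × Int => decide (pivot + 2 ≤ w.1)) hf
    have hzp : decide (pivot + 2 ≤ z.1) = true := List.find?_some (p := fun w : Int × Int => decide (pivot + 2 ≤ w.1)) hf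
    constructor
    · refine List.mem_map_of_mem ?_
      rw [List.mem_filter]
      exact ⟨hperm.mem_iff.mp hzmem, hzp⟩
    · intro b hb
      rw [List.mem_map] at hb
      obtain ⟨w, hw, rfl⟩ := hb
      rw [List.mem_filter] at hw
      have hwS : w ∈ S := hperm.mem_iff.mpr hw.1
      rw [List.find?_eq_some_iff_append] at hf
      obtain ⟨hpz, as, bs, hS, hall⟩ := hf
      subst hS
      rcases List.mem_append.mp hwS with hw1 | hw2
      · exact absurd hw.2 (by simpa using hall w hw1)
      · rcases List.mem_cons.mp hw2 with rfl | hw3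
        · exact le_refl _
        · have := (List.pairwise_append.mp hpair).2.1
          exact (List.pairwise_cons.mp this).1 w hw3

-- B's suffix sweep: characterisation of the reversed accumulator
def sufA : List Int → Int → List Int × Int
  | [], m0 => ([], m0)
  | v :: t, m0 =>
    let r := sufA t m0
    let m := min r.2 v
    (r.1 ++ [m], m)

theorem B_sweep_eq (vs : List Int) (m0 : Int) :
    vs.reverse.foldl
      (fun (st : List Int × Int) v =>
        (st.1 ++ [if st.2 < v then st.2 else v], if st.2 < v then st.2 else v)) ([], m0)
      = sufA vs m0 := by
  rw [List.foldl_reverse]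
  induction vs with
  | nil => rfl
  | cons v t ih =>
    simp only [List.foldr_cons, ih, sufA]
    have : (if (sufA t m0).2 < v then (sufA t m0).2 else v) = min (sufA t m0).2 v := by
      rw [min_def]; split_ifs <;> omega
    rw [this]

theorem sufA_snd (vs : List Int) (m0 : Int) :
    (sufA vs m0).2 = vs.foldr (fun v m => min m v) m0 := by
  induction vs with
  | nil => rfl
  | cons v t ih => simp [sufA, ih]

theorem sufA_length (vs : List Int) (m0 : Int) : (sufA vs m0).1.length = vs.length := by
  induction vs with
  | nil => rfl
  | cons v t ih => simp [sufA, ih]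


theorem sufA_rev_getElem? (vs : List Int) (m0 : Int) (p : Nat) :
    ((sufA vs m0).1.reverse)[p]? =
      if p < vs.length then some ((vs.drop p).foldr (fun v m => min m v) m0) else none := by
  induction vs generalizing p with
  | nil => simp [sufA]
  | cons v t ih =>
    show ((sufA t m0).1 ++ [min (sufA t m0).2 v]).reverse[p]? = _
    rw [List.reverse_append, List.reverse_singleton, List.singleton_append]
    cases p with
    | zero =>
      simp [sufA_snd]
    | succ q =>
      rw [List.getElem?_cons_succ, ih, List.drop_succ_cons]
      simp


theorem foldr_min_facts (l : List Int) (x : Int) :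
    (l.foldr (fun v m => min m v) x = x ∨ l.foldr (fun v m => min m v) x ∈ l)
      ∧ l.foldr (fun v m => min m v) x ≤ x
      ∧ ∀ b ∈ l, l.foldr (fun v m => min m v) x ≤ b := by
  induction l with
  | nil => simp
  | cons v t ih =>
    obtain ⟨hm, hx, hb⟩ := ih
    refine ⟨?_, ?_, ?_⟩
    · simp only [List.foldr_cons]
      rcases le_total (t.foldr (fun v m => min m v) x) v with h | h
      · rw [min_eq_left h]
        rcases hm with h1 | h1
        · left; exact h1
        · right; exact List.mem_cons_of_mem _ h1
      · rw [min_eq_right h]; right; exact List.mem_cons_self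
    · simp only [List.foldr_cons]
      exact le_trans (min_le_left _ _) hx
    · intro b hbm
      simp only [List.foldr_cons]
      rcases List.mem_cons.mp hbm with rfl | h1
      · exact min_le_right _ _
      · exact le_trans (min_le_left _ _) (hb b h1)


theorem foldr_min_eq_min? (l : List Int) (x : Int) (hx : x ∈ l) :
    some (l.foldr (fun v m => min m v) x) = l.min? := by
  obtain ⟨hm, hle, hb⟩ := foldr_min_facts l x
  symm
  rw [List.min?_eq_some_iff]
  refine ⟨?_, hb⟩
  rcases hm with h | h
  · rw [h]; exact hx
  · exact h

-- ===== A reduces to nf =====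
theorem solution_eq_nf (A : List Int) (h : 4 ≤ A.length) :
    solution A = nf (PySem.List.slice A (some 1) (some (-1))) := by
  set vs := PySem.List.slice A (some 1) (some (-1)) with hvs
  have hlen : vs.length = A.length - 2 := by
    rw [hvs]; simp [pysem]; omega
  have hn2 : 2 ≤ vs.length := by omega
  have hb : (A.length : Int) - 1 = 1 + (vs.length : Int) := by omega
  unfold solution
  rw [← hvs, hb, zip_pyRange_eq_enumerate]
  set E := PySem.List.enumerate vs 1 with hE
  have hitems : (E.foldl (fun d p => d.insert p.1 p.2)
      (PySem.Dict.empty : PySem.Dict Int Int)).items = E := by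
    have hnd : (E.map (fun p => p.1)).Nodup := by
      rw [hE, PySem.List.map_fst_enumerate]; exact PySem.List.nodup_pyRange_one 1 _
    have := PySem.Dict.items_foldl_insert_fresh E (fun p => p.1) (fun p => p.2)
      PySem.Dict.empty (fun a _ => PySem.Dict.contains_empty _) hnd
    simpa using this
  have hsize : (E.foldl (fun d p => d.insert p.1 p.2)
      (PySem.Dict.empty : PySem.Dict Int Int)).size = vs.length := by
    show (E.foldl (fun d p => d.insert p.1 p.2)
      (PySem.Dict.empty : PySem.Dict Int Int)).items.length = vs.length
    rw [hitems, hE, PySem.List.length_enumerate]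
  dsimp only
  rw [hitems, hsize]
  set S := PySem.List.sorted E (fun z => z.2) false with hS
  have hperm : S.Perm E := PySem.List.sorted_perm E (fun z => z.2) false
  have hpair : S.Pairwise (fun x y => x.2 ≤ y.2) := PySem.List.sorted_pairwise E (fun z => z.2)
  have hSlen : S.length = vs.length := by
    rw [hS, PySem.List.length_sorted, hE, PySem.List.length_enumerate]
  have hmapsnd : S.map (fun z => z.2) = PySem.List.sorted vs (fun x => x) false := by
    symm
    apply PySem.List.sorted_id_eq_of_perm_of_pairwise
    · have hEv : E.map (fun z => z.2) = vs := by rw [hE]; exact PySem.List.map_snd_enumerate vs 1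
      have hp := hperm.map (fun z => z.2)
      rw [hEv] at hp
      exact hp
    · exact List.Pairwise.map _ (fun a b hh => hh) hpair
  have h1lt : vs.length - 1 < S.length := by omega
  have h2lt : vs.length - 2 < S.length := by omega
  have hg1 : PySem.List.pyGet? S (-1) = some S[vs.length - 1] := by
    rw [PySem.List.pyGet?_neg_one, List.getLast?_eq_getElem?, hSlen, List.getElem?_eq_getElem h1lt]
  have hg2 : PySem.List.pyGet? S (-2) = some S[vs.length - 2] := by
    rw [PySem.List.pyGet?_neg_ofNat S 2 (by omega) (by omega), hSlen, List.getElem?_eq_getElem h2lt]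
  rw [hg1, hg2]
  dsimp only
  have hsval : ∀ (k : Nat) (hk : k < S.length),
      (PySem.List.sorted vs (fun x => x) false).getD k 0 = S[k].2 := by
    intro k hk
    rw [← hmapsnd, List.getD_eq_getElem?_getD, List.getElem?_map,
      List.getElem?_eq_getElem hk]
    rfl
  -- reduce the index loop to a fold over sortedCost
  rw [show (vs.length : Int) = ((S.length : Nat) : Int) by rw [hSlen]]
  rw [PySem.List.foldl_pyRange_zero_pyGetD' S ((0 : Int), (0 : Int))
    (fun st pr => (solInner S pr.1 pr.2 st.1 st.2, true)) (S[vs.length - 1].2 + S[vs.length - 2].2, false)]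
  rw [outer_fold_eq]
  have hpermE : S.Perm (PySem.List.enumerate vs 1) := hE ▸ hperm
  have hfun : ∀ (acc : Int), ∀ pr ∈ S,
      (match S.find? (fun z => !isAdjacent pr.1 z.1) with
        | none => acc | some z => min acc (z.2 + pr.2))
      = (match (vs.drop (pr.1 + 1).toNat).min? with
        | none => acc | some m => min acc (m + pr.2)) := by
    intro acc pr _
    have hmin := find_sorted_eq_min vs S hpermE hpair pr.1
    rw [not_adjacent_eq]
    cases hf : S.find? (fun z : Int × Int => decide (pr.1 + 2 ≤ z.1)) with
    | none =>
      rw [hf, Option.map_none] at hmin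
      rw [← hmin]
    | some z =>
      rw [hf, Option.map_some] at hmin
      rw [← hmin]
  rw [PySem.List.foldl_congr_mem S _ _ _ hfun]
  have hrc : RightCommutative (fun (acc : Int) (pr : Int × Int) =>
      (match (vs.drop (pr.1 + 1).toNat).min? with
        | none => acc | some m => min acc (m + pr.2))) := by
    constructor
    intro b a₁ a₂
    cases (vs.drop (a₁.1 + 1).toNat).min? <;> cases (vs.drop (a₂.1 + 1).toNat).min? <;>
      simp [min_comm, min_left_comm]
  rw [List.Perm.foldl_eq (rcomm := hrc) hperm]
  -- split the enumeration into the contributing prefix and the inert tail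
  have hsplit : E = PySem.List.enumerate (vs.take (vs.length - 2)) 1
      ++ PySem.List.enumerate (vs.drop (vs.length - 2)) (1 + ((vs.take (vs.length - 2)).length : Int)) := by
    rw [hE]
    conv_lhs => rw [← List.take_append_drop (vs.length - 2) vs]
    rw [PySem.List.enumerate_append]
  have htakelen : (vs.take (vs.length - 2)).length = vs.length - 2 := by
    rw [List.length_take]; omega
  rw [hsplit, List.foldl_append]
  have htail : ∀ (init : Int),
      (PySem.List.enumerate (vs.drop (vs.length - 2)) (1 + ((vs.take (vs.length - 2)).length : Int))).foldl
        (fun acc pr =>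
          (match (vs.drop (pr.1 + 1).toNat).min? with
            | none => acc | some m => min acc (m + pr.2))) init = init := by
    intro init
    rw [PySem.List.foldl_congr_mem _ _ (fun acc _ => acc) init ?_, PySem.List.foldl_ignore]
    intro acc z hz
    rw [PySem.List.mem_enumerate_iff] at hz
    obtain ⟨k, hk, rfl⟩ := hz
    have hdrop : vs.drop (((1 + ((vs.take (vs.length - 2)).length : Int) + (k : Int))) + 1).toNat = [] := by
      apply List.drop_eq_nil_of_le
      rw [htakelen] at *
      omega
    rw [hdrop, List.min?_nil]
  rw [htail]
  -- the contributing prefix is exactly nf's fold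
  unfold nf
  rw [hsval _ h1lt, hsval _ h2lt]
  apply PySem.List.foldl_congr_mem
  intro acc z hz
  rw [PySem.List.mem_enumerate_iff] at hz
  obtain ⟨k, hk, rfl⟩ := hz
  rw [htakelen] at hk
  have hidx : ((1 + (k : Int)) + 1).toNat = k + 2 := by omega
  rw [hidx]
  have hne : vs.drop (k + 2) ≠ [] := by
    apply List.ne_nil_of_length_pos
    rw [List.length_drop]
    omega
  cases hm : (vs.drop (k + 2)).min? with
  | none => exact absurd (List.min?_eq_none_iff.mp hm) hne
  | some m => simp

-- ===== B reduces to nf =====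
theorem solution_alt_eq_nf (A : List Int) (h : 4 ≤ A.length) :
    solution_alt A = nf (PySem.List.slice A (some 1) (some (-1))) := by
  set vs := PySem.List.slice A (some 1) (some (-1)) with hvs
  have hlen : vs.length = A.length - 2 := by
    rw [hvs]; simp [pysem]; omega
  have hn2 : 2 ≤ vs.length := by omega
  have hne : vs ≠ [] := by apply List.ne_nil_of_length_pos; omega
  unfold solution_alt
  rw [← hvs]
  dsimp only
  have hg0 : PySem.List.pyGet? vs (-1) = some (vs.getLast hne) := by
    rw [PySem.List.pyGet?_neg_one, List.getLast?_eq_some_getLast hne]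
  rw [hg0]
  dsimp only
  set m0 := vs.getLast hne with hm0
  rw [B_sweep_eq]
  have hsuffget : ∀ p : Nat, p < vs.length → ((sufA vs m0).1.reverse)[p]? = (vs.drop p).min? := by
    intro p hp
    rw [sufA_rev_getElem?, if_pos hp]
    apply foldr_min_eq_min?
    apply List.mem_of_getLast?
    rw [List.getLast?_drop, if_neg (by omega), hm0, List.getLast?_eq_some_getLast hne]
  set s := PySem.List.sorted vs (fun x => x) false with hs
  have hslen : s.length = vs.length := by rw [hs, PySem.List.length_sorted]
  have h1lt : vs.length - 1 < s.length := by omega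
  have h2lt : vs.length - 2 < s.length := by omega
  have hq1 : PySem.List.pyGet? s (-1) = some s[vs.length - 1] := by
    rw [PySem.List.pyGet?_neg_one, List.getLast?_eq_getElem?, hslen, List.getElem?_eq_getElem h1lt]
  have hq2 : PySem.List.pyGet? s (-2) = some s[vs.length - 2] := by
    rw [PySem.List.pyGet?_neg_ofNat s 2 (by omega) (by omega), hslen, List.getElem?_eq_getElem h2lt]
  rw [hq1, hq2]
  dsimp only
  rw [PySem.List.slice_from ((sufA vs m0).1.reverse) (by norm_num : (0:Int) ≤ 2)]
  rw [show ((2:Int)).toNat = 2 from rfl]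
  have hzip : vs.zip (((sufA vs m0).1.reverse).drop 2)
      = (PySem.List.enumerate (vs.take (vs.length - 2)) 1).map
          (fun z => (z.2, ((vs.drop (z.1 + 1).toNat).min?).getD 0)) := by
    apply List.ext_getElem?
    intro p
    rw [List.zip_eq_zipWith, List.getElem?_zipWith, List.getElem?_map,
      PySem.List.getElem?_enumerate, List.getElem?_take, List.getElem?_drop]
    by_cases hp : p < vs.length - 2
    · rw [if_pos hp]
      have hvp : vs[p]? = some vs[p] := List.getElem?_eq_getElem (by omega)
      have hsp := hsuffget (2 + p) (by omega)
      have hidx : ((1 + (p : Int)) + 1).toNat = 2 + p := by omega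
      have hnn : vs.drop (2 + p) ≠ [] := by
        apply List.ne_nil_of_length_pos
        rw [List.length_drop]
        omega
      cases hm : (vs.drop (2 + p)).min? with
      | none => exact absurd (List.min?_eq_none_iff.mp hm) hnn
      | some m =>
        rw [hm] at hsp
        rw [hvp, hsp]
        dsimp only [Option.map_some]
        rw [hidx, hm]
        rfl
    · rw [if_neg hp]
      have hsp : (((sufA vs m0).1.reverse))[2 + p]? = none := by
        rw [List.getElem?_eq_none_iff, List.length_reverse, sufA_length]
        omega
      rw [hsp]
      cases vs[p]? <;> rfl
  rw [hzip, List.foldl_map]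
  unfold nf
  have hsval : ∀ (k : Nat) (hk : k < s.length), s.getD k 0 = s[k] := by
    intro k hk
    rw [List.getD_eq_getElem?_getD, List.getElem?_eq_getElem hk]
    rfl
  rw [← hs, hsval _ h1lt, hsval _ h2lt]
  apply PySem.List.foldl_congr_mem
  intro acc z _
  rw [min_def]
  split_ifs <;> omega

-- ===== VERDICT (by name: the statement is the Claim_ definition above) =====
theorem solution_spec : Claim_equal_solution := by
  intro A _ hpre
  unfold Spec_solution
  rw [solution_eq_nf A hpre, solution_alt_eq_nf A hpre]
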